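-- pv_equiv track=rewrite | github.com/hwsalmon/GammaTile-EQD2-Converter | viewer.py | assign_structure_colors
-- ===== SOURCE A (Python) =====
-- _NAMED_COLORS: dict[str, str] = {
--     "ctv":            "#FF8C00",
--     "ptv":            "#FF0000",
--     "brainstem":      "#9400D3",   # must come BEFORE "brain"
--     "brain":          "#4169E1",
--     "spinalcord":     "#FFFF00",
--     "cord":           "#FFFF00",
--     "eye":            "#00CED1",
--     "opticnrv":       "#7CFC00",
--     "opticchiasm":    "#FF00FF",
--     "parotid":        "#87CEEB",
--     "cochlea":        "#FFB6C1",
--     "lens":           "#98FB98",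
--     "pituitary":      "#FFA07A",
--     "ln_":            "#DDA0DD",
--     "musc":           "#CD853F",
--     "glnd":           "#F0E68C",
--     "brachial":       "#E9967A",
-- }
--
-- _PALETTE = [
--     "#00FFFF", "#FF69B4", "#32CD32", "#FF6347", "#00CED1",
--     "#DDA0DD", "#F0E68C", "#CD853F", "#00FA9A", "#FF4500",
--     "#1E90FF", "#FF1493", "#ADFF2F", "#FFA500", "#7B68EE",
--     "#48D1CC", "#DA70D6", "#90EE90", "#FF7F50", "#40E0D0",
-- ]
--
-- def assign_structure_colors(names: list[str]) -> dict[str, str]: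
--     colors: dict[str, str] = {}
--     palette_idx = 0
--     for name in names:
--         key = name.lower().replace(" ", "").replace("_", "").replace("-", "")
--         matched = False
--         for fragment, color in _NAMED_COLORS.items():
--             if fragment.replace("_", "") in key:
--                 colors[name] = color
--                 matched = True
--                 break
--         if not matched:
--             colors[name] = _PALETTE[palette_idx % len(_PALETTE)]
--             palette_idx += 1
--     return colors
-- ===== SOURCE B (Python) =====
-- _NAMED_COLORS: dict[str, str] = {
--     "ctv":            "#FF8C00",
--     "ptv":            "#FF0000",
--     "brainstem":      "#9400D3",
--     "brain":          "#4169E1",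
--     "spinalcord":     "#FFFF00",
--     "cord":           "#FFFF00",
--     "eye":            "#00CED1",
--     "opticnrv":       "#7CFC00",
--     "opticchiasm":    "#FF00FF",
--     "parotid":        "#87CEEB",
--     "cochlea":        "#FFB6C1",
--     "lens":           "#98FB98",
--     "pituitary":      "#FFA07A",
--     "ln_":            "#DDA0DD",
--     "musc":           "#CD853F",
--     "glnd":           "#F0E68C",
--     "brachial":       "#E9967A",
-- }
--
-- _PALETTE = [
--     "#00FFFF", "#FF69B4", "#32CD32", "#FF6347", "#00CED1",
--     "#DDA0DD", "#F0E68C", "#CD853F", "#00FA9A", "#FF4500",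
--     "#1E90FF", "#FF1493", "#ADFF2F", "#FFA500", "#7B68EE",
--     "#48D1CC", "#DA70D6", "#90EE90", "#FF7F50", "#40E0D0",
-- ]
--
-- # Inverted index: stripped fragment -> (priority rank, color).  Instead of
-- # scanning the fragment table per name, B enumerates every substring of the
-- # normalized name, looks it up in this hash table, and keeps the hit with the
-- # smallest rank (= earliest entry of _NAMED_COLORS, so first-match order is
-- # preserved, e.g. "brainstem" before "brain").
-- _FRAG_INDEX: dict[str, tuple[int, str]] = {}
-- for _rank, (_frag, _color) in enumerate(_NAMED_COLORS.items()):
--     _FRAG_INDEX.setdefault(_frag.replace("_", ""), (_rank, _color))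
--
--
-- def _best_hit(key: str):
--     best = None
--     n = len(key)
--     for i in range(n):
--         for j in range(i + 1, n + 1):
--             hit = _FRAG_INDEX.get(key[i:j])
--             if hit is not None and (best is None or hit[0] < best[0]):
--                 best = hit
--     return best
--
--
-- def assign_structure_colors(names: list[str]) -> dict[str, str]:
--     colors: dict[str, str] = {}
--     misses = 0
--     for name in names:
--         key = name.lower().replace(" ", "").replace("_", "").replace("-", "")
--         hit = _best_hit(key)
--         if hit is None:
--             colors[name] = _PALETTE[misses % len(_PALETTE)]
--             misses += 1
--         else:
--             colors[name] = hit[1]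
--     return colors
-- ===== Notes on version B (the rewrite author's own statement) =====
-- stated objective: alternative
-- what changed: A scans the fragment table per name testing each stripped fragment for substring containment; B inverts the search: it builds a hash index from stripped fragment to (rank, color) once, enumerates all substrings of the normalized name, looks each up in the index and keeps the hit of least rank, so first-match order is recovered by min-rank instead of scan order.
import Mathlib
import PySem

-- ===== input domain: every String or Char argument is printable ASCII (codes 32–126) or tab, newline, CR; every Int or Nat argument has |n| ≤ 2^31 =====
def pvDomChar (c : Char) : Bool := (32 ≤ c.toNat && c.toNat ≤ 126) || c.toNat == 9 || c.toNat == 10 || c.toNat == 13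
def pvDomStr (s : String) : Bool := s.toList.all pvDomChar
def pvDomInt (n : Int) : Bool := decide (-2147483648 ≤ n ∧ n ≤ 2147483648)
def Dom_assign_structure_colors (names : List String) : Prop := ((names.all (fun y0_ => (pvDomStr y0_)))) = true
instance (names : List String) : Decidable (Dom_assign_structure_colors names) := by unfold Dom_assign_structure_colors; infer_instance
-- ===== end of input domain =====

-- B replaces A's per-name scan of the fragment table by an inverted hash index: all substrings of the
-- normalized name are looked up in a stripped-fragment → (rank, color) index and the least-rank hit wins;
-- objective: alternative algorithm, same observable result.
-- ===== PORT A =====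
def pvNamedColors : List (String × String) := [
  ("ctv", "#FF8C00"), ("ptv", "#FF0000"), ("brainstem", "#9400D3"), ("brain", "#4169E1"),
  ("spinalcord", "#FFFF00"), ("cord", "#FFFF00"), ("eye", "#00CED1"), ("opticnrv", "#7CFC00"),
  ("opticchiasm", "#FF00FF"), ("parotid", "#87CEEB"), ("cochlea", "#FFB6C1"), ("lens", "#98FB98"),
  ("pituitary", "#FFA07A"), ("ln_", "#DDA0DD"), ("musc", "#CD853F"), ("glnd", "#F0E68C"),
  ("brachial", "#E9967A")]

def pvPalette : List String := [
  "#00FFFF", "#FF69B4", "#32CD32", "#FF6347", "#00CED1",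
  "#DDA0DD", "#F0E68C", "#CD853F", "#00FA9A", "#FF4500",
  "#1E90FF", "#FF1493", "#ADFF2F", "#FFA500", "#7B68EE",
  "#48D1CC", "#DA70D6", "#90EE90", "#FF7F50", "#40E0D0"]

-- the key both Pythons compute: name.lower().replace(" ","").replace("_","").replace("-","")
def pvNormalize (name : String) : String :=
  PySem.Str.replace (PySem.Str.replace (PySem.Str.replace
    (PySem.Str.lower name) " " "") "_" "") "-" ""

-- A's inner 'for fragment, color in _NAMED_COLORS.items(): … break': first matching color
def pvAFirst : List (String × String) → String → Option String
  | [], _ => none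
  | (f, c) :: rest, key =>
      if PySem.Str.isIn (PySem.Str.replace f "_" "") key then some c else pvAFirst rest key

-- index is always in range (palette_idx % 20 < 20), so getD's default is never used
def assign_structure_colors (names : List String) : List (String × String) :=
  (names.foldl (fun (st : PySem.Dict String String × Nat) name =>
      match pvAFirst pvNamedColors (pvNormalize name) with
      | some c => (st.1.insert name c, st.2)
      | none => (st.1.insert name (pvPalette.getD (st.2 % pvPalette.length) ""), st.2 + 1))
    (PySem.Dict.empty, 0)).1.items

-- ===== PORT B =====
-- _FRAG_INDEX: built once by 'for rank, (frag, color) in enumerate(...): setdefault(frag.replace("_",""), (rank, color))'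
def pvFragIndex : PySem.Dict String (Int × String) :=
  (PySem.List.enumerate pvNamedColors).foldl
    (fun d p => d.setdefault (PySem.Str.replace p.2.1 "_" "") (p.1, p.2.2))
    PySem.Dict.empty

-- body of _best_hit's inner loop: 'hit = _FRAG_INDEX.get(key[i:j]); if hit is not None and (...)'
def pvBestStep (best : Option (Int × String)) (s : String) : Option (Int × String) :=
  match pvFragIndex.get? s with
  | none => best
  | some hit =>
      match best with
      | none => some hit
      | some b => if hit.1 < b.1 then some hit else best

-- _best_hit: double loop over i in range(n), j in range(i+1, n+1), min-rank accumulator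
def pvBestHit (key : String) : Option (Int × String) :=
  (PySem.List.pyRange 0 (PySem.Str.len key) 1).foldl (fun best i =>
    (PySem.List.pyRange (i + 1) (PySem.Str.len key + 1) 1).foldl (fun best j =>
      pvBestStep best (PySem.Str.slice key (some i) (some j))) best) none

def assign_structure_colors_alt (names : List String) : List (String × String) :=
  (names.foldl (fun (st : PySem.Dict String String × Nat) name =>
      match pvBestHit (pvNormalize name) with
      | none => (st.1.insert name (pvPalette.getD (st.2 % pvPalette.length) ""), st.2 + 1)
      | some hit => (st.1.insert name hit.2, st.2))
    (PySem.Dict.empty, 0)).1.items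

-- ===== PRECONDITION & SPEC =====
def Spec_assign_structure_colors (names : List String) (out : List (String × String)) : Prop := out = assign_structure_colors_alt names
instance (names : List String) (out : List (String × String)) : Decidable (Spec_assign_structure_colors names out) := by unfold Spec_assign_structure_colors; infer_instance

-- ===== CLAIM =====
def Claim_equal_assign_structure_colors : Prop := ∀ (names : List String), Dom_assign_structure_colors names → Spec_assign_structure_colors names (assign_structure_colors names)

-- ===== LEMMAS AND PROOFS =====
-- the fragment index as a plain ranked association list
def pvRankify : List (String × String) → Int → List (String × (Int × String))
  | [], _ => []
  | (f, c) :: t, r => (PySem.Str.replace f "_" "", (r, c)) :: pvRankify t (r + 1)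

def pvRanked : List (String × (Int × String)) := pvRankify pvNamedColors 0

def pvGetL (L : List (String × (Int × String))) (s : String) : Option (Int × String) :=
  (L.find? (fun e => e.1 == s)).map (·.2)

def pvOpmin : Option (Int × String) → Option (Int × String) → Option (Int × String)
  | none, y => y
  | some b, none => some b
  | some b, some h => if h.1 < b.1 then some h else some b

def pvM (ss : List String) : Option (Int × String) := ss.foldl pvBestStep none

def pvSubs (key : String) : List String :=
  (PySem.List.pyRange 0 (PySem.Str.len key) 1).flatMap
    (fun i => (PySem.List.pyRange (i + 1) (PySem.Str.len key + 1) 1).map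
      (fun j => PySem.Str.slice key (some i) (some j)))

theorem pvFragIndex_eq : pvFragIndex = ⟨pvRanked⟩ := by decide

theorem get?_mk_eq (L : List (String × (Int × String))) (s : String) :
    (PySem.Dict.mk L).get? s = pvGetL L s := by
  induction L with
  | nil => rfl
  | cons e t ih =>
      obtain ⟨k, v⟩ := e
      rw [PySem.Dict.get?_mk_cons]
      simp only [pvGetL, List.find?_cons]
      by_cases h : (k == s) = true
      · simp [h]
      · simp only [Bool.not_eq_true] at h
        simp [h, ih, pvGetL]

theorem pvBestStep_eq (best : Option (Int × String)) (s : String) :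
    pvBestStep best s = pvOpmin best (pvFragIndex.get? s) := by
  unfold pvBestStep
  cases pvFragIndex.get? s <;> cases best <;> rfl

theorem pvOpmin_none_left (x : Option (Int × String)) : pvOpmin none x = x := rfl

theorem pvOpmin_assoc (a b c : Option (Int × String)) :
    pvOpmin (pvOpmin a b) c = pvOpmin a (pvOpmin b c) := by
  rcases a with _ | a <;> rcases b with _ | b <;> rcases c with _ | c <;>
    simp only [pvOpmin] <;> split_ifs <;> first | rfl | omega | (simp only [pvOpmin]; split_ifs <;> first | rfl | omega)

theorem pvFoldl_opmin (ss : List String) (b : Option (Int × String)) :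
    ss.foldl pvBestStep b = pvOpmin b (ss.foldl pvBestStep none) := by
  induction ss generalizing b with
  | nil => cases b <;> rfl
  | cons s t ih =>
      simp only [List.foldl_cons]
      rw [ih (pvBestStep b s), ih (pvBestStep none s), pvBestStep_eq b, pvBestStep_eq none,
        pvOpmin_none_left, pvOpmin_assoc]

theorem pvMerge (L : List (String × (Int × String)))
    (hinc : L.Pairwise (fun a b => a.2.1 < b.2.1)) (s : String) (ss : List String) :
    pvOpmin (pvGetL L s) ((L.find? (fun e => decide (e.1 ∈ ss))).map (·.2))
      = (L.find? (fun e => decide (e.1 ∈ s :: ss))).map (·.2) := by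
  induction L with
  | nil => rfl
  | cons e t ih =>
      rw [List.pairwise_cons] at hinc
      by_cases h1 : e.1 = s
      · -- head entry's key is s itself: it wins (any hit in the tail has larger rank)
        have hA : pvGetL (e :: t) s = some e.2 := by simp [pvGetL, h1]
        have hC : List.find? (fun x => decide (x.1 ∈ s :: ss)) (e :: t) = some e := by
          simp [List.mem_cons, h1]
        rw [hA, hC]
        cases hF : List.find? (fun x => decide (x.1 ∈ ss)) (e :: t) with
        | none => rfl
        | some v =>
            have hv := List.mem_of_find?_eq_some hF
            rcases List.mem_cons.mp hv with hv | hv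
            · subst hv; simp [pvOpmin]
            · have hlt := hinc.1 v hv
              simp only [Option.map_some, pvOpmin]
              rw [if_neg (by omega : ¬ v.2.1 < e.2.1)]
      · by_cases h2 : e.1 ∈ ss
        · have hA : pvGetL (e :: t) s = pvGetL t s := by simp [pvGetL, h1]
          have hB : List.find? (fun x => decide (x.1 ∈ ss)) (e :: t) = some e := by
            simp [h2]
          have hC : List.find? (fun x => decide (x.1 ∈ s :: ss)) (e :: t) = some e := by
            simp [List.mem_cons, h2]
          rw [hA, hB, hC]
          cases hG : List.find? (fun x => x.1 == s) t with
          | none => simp [pvGetL, hG, pvOpmin]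
          | some a =>
              have ha := hinc.1 a (List.mem_of_find?_eq_some hG)
              simp only [pvGetL, hG, Option.map_some, pvOpmin]
              rw [if_pos (by omega : e.2.1 < a.2.1)]
        · have hA : pvGetL (e :: t) s = pvGetL t s := by simp [pvGetL, h1]
          have hB : List.find? (fun x => decide (x.1 ∈ ss)) (e :: t)
              = List.find? (fun x => decide (x.1 ∈ ss)) t := by
            simp [h2]
          have hC : List.find? (fun x => decide (x.1 ∈ s :: ss)) (e :: t)
              = List.find? (fun x => decide (x.1 ∈ s :: ss)) t := by
            simp [List.mem_cons, h1, h2]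
          rw [hA, hB, hC]
          exact ih hinc.2

theorem pvRanked_pairwise : pvRanked.Pairwise (fun a b => a.2.1 < b.2.1) := by decide

theorem pvM_eq (ss : List String) :
    pvM ss = (pvRanked.find? (fun e => decide (e.1 ∈ ss))).map (·.2) := by
  induction ss with
  | nil =>
      have : List.find? (fun e => decide (e.1 ∈ ([] : List String))) pvRanked = none := by
        rw [List.find?_eq_none]; intro x _; simp
      simp only [pvM, List.foldl_nil, this, Option.map_none]
  | cons s t ih =>
      have : pvM (s :: t) = pvOpmin (pvGetL pvRanked s) (pvM t) := by
        simp only [pvM, List.foldl_cons]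
        rw [pvFoldl_opmin, pvBestStep_eq, pvOpmin_none_left, pvFragIndex_eq, get?_mk_eq]
      rw [this, ih, pvMerge pvRanked pvRanked_pairwise]

theorem pvBestHit_eq_M (key : String) : pvBestHit key = pvM (pvSubs key) := by
  simp only [pvBestHit, pvM, pvSubs, List.foldl_flatMap, List.foldl_map]

-- own small congruence lemma for find? under a member-wise equal predicate (no Mathlib name found)
theorem pvFind?_congr {α : Type} (p q : α → Bool) (l : List α) (h : ∀ a ∈ l, p a = q a) :
    l.find? p = l.find? q := by
  induction l with
  | nil => rfl
  | cons x t ih =>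
      simp only [List.find?_cons, h x (List.mem_cons_self ..)]
      cases q x
      · exact ih fun a ha => h a (List.mem_cons_of_mem _ ha)
      · rfl

theorem mem_pvSubs_iff (key s : String) (hs : s.toList ≠ []) :
    s ∈ pvSubs key ↔ PySem.Str.isIn s key = true := by
  constructor
  · intro hmem
    simp only [pvSubs, List.mem_flatMap, List.mem_map, PySem.List.mem_pyRange_one] at hmem
    obtain ⟨i, ⟨hi0, hin⟩, j, ⟨hij, hjn⟩, hseq⟩ := hmem
    rw [PySem.Str.isIn_iff_infix, ← hseq]
    have : (PySem.Str.slice key (some i) (some j)).toList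
        = (key.toList.drop i.toNat).take (j.toNat - i.toNat) := by
      rw [PySem.Str.toList_slice, PySem.Chars.slice_eq_listSlice,
        PySem.List.slice_toNat _ _ _]
      all_goals omega
    rw [this]
    exact ((List.take_prefix _ _).isInfix).trans ((List.drop_suffix _ _).isInfix)
  · intro hin
    rw [PySem.Str.isIn_iff_infix] at hin
    obtain ⟨a, hpre⟩ := (PySem.Chars.exists_prefix_drop_iff_isIn s.toList key.toList).mpr
      ((PySem.Str.isIn_iff_infix s key).mpr hin)
    have hlen : 1 ≤ s.toList.length := by
      cases h : s.toList with
      | nil => exact absurd h hs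
      | cons _ _ => simp
    have hle : s.toList.length ≤ key.toList.length - a := by
      have := hpre.length_le
      simpa using this
    have hN : a + s.toList.length ≤ key.toList.length := by omega
    have haN : a < key.toList.length := by omega
    have hkeylen : PySem.Str.len key = (key.toList.length : Int) := by
      simp [PySem.Str.len]
    simp only [pvSubs, List.mem_flatMap, List.mem_map, PySem.List.mem_pyRange_one]
    refine ⟨(a : Int), ⟨by positivity, by rw [hkeylen]; exact_mod_cast haN⟩,
      ((a + s.toList.length : Nat) : Int), ⟨by push_cast; omega, by rw [hkeylen]; push_cast; omega⟩, ?_⟩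
    apply String.toList_inj.mp
    rw [PySem.Str.toList_slice, PySem.Chars.slice_eq_listSlice, PySem.List.slice_natCast]
    have : a + s.toList.length - a = s.toList.length := by omega
    rw [this]
    exact (List.prefix_iff_eq_take.mp hpre).symm

theorem pvRanked_keys_nonempty : ∀ e ∈ pvRanked, e.1.toList ≠ [] := by decide

-- A's first-match scan over the table = find? over the ranked list
theorem pvAFirst_eq_rankify (L : List (String × String)) (r : Int) (key : String) :
    pvAFirst L key = ((pvRankify L r).find? (fun e => PySem.Str.isIn e.1 key)).map (·.2.2) := by
  induction L generalizing r with
  | nil => rfl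
  | cons e t ih =>
      obtain ⟨f, c⟩ := e
      simp only [pvAFirst, pvRankify, List.find?_cons]
      by_cases h : PySem.Chars.isIn (PySem.Chars.replace f.toList ['_'] []) key.toList = true
      · simp [h]
      · simp only [Bool.not_eq_true] at h
        simp [h, ih (r + 1)]

-- B's substring-index minimum = A's first-match scan
theorem pvBestHit_eq (key : String) :
    (pvBestHit key).map (·.2) = pvAFirst pvNamedColors key := by
  rw [pvBestHit_eq_M, pvM_eq, pvAFirst_eq_rankify pvNamedColors 0 key]
  rw [pvFind?_congr (fun e => decide (e.1 ∈ pvSubs key)) (fun e => PySem.Str.isIn e.1 key)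
    pvRanked (fun e he => by
      show decide (e.1 ∈ pvSubs key) = PySem.Str.isIn e.1 key
      have hiff := mem_pvSubs_iff key e.1 (pvRanked_keys_nonempty e he)
      by_cases hm : e.1 ∈ pvSubs key
      · rw [hiff.mp hm, decide_eq_true_eq]
        exact hm
      · have hfalse : PySem.Str.isIn e.1 key = false := by
          cases hq : PySem.Str.isIn e.1 key
          · rfl
          · exact absurd (hiff.mpr hq) hm
        rw [hfalse, decide_eq_false_iff_not]
        exact hm)]
  have hR : pvRankify pvNamedColors 0 = pvRanked := rfl
  rw [hR]
  cases hf : List.find? (fun e => PySem.Str.isIn e.1 key) pvRanked <;> simp [hf]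

set_option maxHeartbeats 1000000 in
theorem step_eq (st : PySem.Dict String String × Nat) (name : String) :
    (match pvAFirst pvNamedColors (pvNormalize name) with
      | some c => (st.1.insert name c, st.2)
      | none => (st.1.insert name (pvPalette.getD (st.2 % pvPalette.length) ""), st.2 + 1))
    = (match pvBestHit (pvNormalize name) with
      | none => (st.1.insert name (pvPalette.getD (st.2 % pvPalette.length) ""), st.2 + 1)
      | some hit => (st.1.insert name hit.2, st.2)) := by
  have h := pvBestHit_eq (pvNormalize name)
  cases hB : pvBestHit (pvNormalize name) with
  | none => rw [hB] at h; simp only [Option.map_none] at h; rw [← h]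
  | some hit => rw [hB] at h; simp only [Option.map_some] at h; rw [← h]

theorem foldl_steps_eq (names : List String) (st : PySem.Dict String String × Nat) :
    names.foldl (fun (st : PySem.Dict String String × Nat) name =>
      match pvAFirst pvNamedColors (pvNormalize name) with
      | some c => (st.1.insert name c, st.2)
      | none => (st.1.insert name (pvPalette.getD (st.2 % pvPalette.length) ""), st.2 + 1)) st
    = names.foldl (fun (st : PySem.Dict String String × Nat) name =>
      match pvBestHit (pvNormalize name) with
      | none => (st.1.insert name (pvPalette.getD (st.2 % pvPalette.length) ""), st.2 + 1)
      | some hit => (st.1.insert name hit.2, st.2)) st :=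
  PySem.List.foldl_congr_mem names _ _ st (fun acc x _ => step_eq acc x)

theorem assign_structure_colors_eq (names : List String) :
    assign_structure_colors names = assign_structure_colors_alt names :=
  congrArg (fun st => st.1.items) (foldl_steps_eq names (PySem.Dict.empty, 0))

-- ===== VERDICT =====
theorem assign_structure_colors_spec : Claim_equal_assign_structure_colors := by
  intro names _
  unfold Spec_assign_structure_colors
  exact assign_structure_colors_eq names
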